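-- pv_equiv track=rewrite | github.com/csquillz/SSW | musicrecplus.py | mostPopularArtists
-- ===== SOURCE A (Python) =====
-- def mostPopularArtists(userMap):
--     '''Returns the most popular artist or artists'''
--     users = userMap.keys()
--     Freqs = {}
--     maxlikes = 0
--     mostpop = []
--     for user in users:
--         for artist in userMap[user]:
--             if artist not in Freqs:
--                 Freqs[artist] = 1
--             else:
--                 popularity_count = Freqs[artist]
--                 popularity_count += 1
--                 Freqs[artist] = popularity_count
--     for artist in Freqs:
--         if Freqs[artist] > maxlikes:
--             maxlikes = Freqs[artist]
--
--     for artist in Freqs: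
--         if Freqs[artist] == maxlikes:
--             mostpop += [artist]
--     return mostpop
-- ===== SOURCE B (Python) =====
-- def mostPopularArtists(userMap):
--     '''Returns the most popular artist or artists'''
--     freqs = {}
--     for artists in userMap.values():
--         for artist in artists:
--             freqs[artist] = freqs.get(artist, 0) + 1
--     buckets = {}
--     maxlikes = 0
--     for artist, count in freqs.items():
--         buckets.setdefault(count, []).append(artist)
--         maxlikes = max(maxlikes, count)
--     return buckets.get(maxlikes, [])
-- ===== Notes on version B (the rewrite author's own statement) =====
-- stated objective: alternative
-- what changed: After the frequency count, A's two separate scans over the artists (one to find the maximum count, one to collect the artists with it) are replaced by a single pass that builds an inverted index count -> artists while tracking the maximum, followed by one O(1) bucket lookup.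
import Mathlib
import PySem

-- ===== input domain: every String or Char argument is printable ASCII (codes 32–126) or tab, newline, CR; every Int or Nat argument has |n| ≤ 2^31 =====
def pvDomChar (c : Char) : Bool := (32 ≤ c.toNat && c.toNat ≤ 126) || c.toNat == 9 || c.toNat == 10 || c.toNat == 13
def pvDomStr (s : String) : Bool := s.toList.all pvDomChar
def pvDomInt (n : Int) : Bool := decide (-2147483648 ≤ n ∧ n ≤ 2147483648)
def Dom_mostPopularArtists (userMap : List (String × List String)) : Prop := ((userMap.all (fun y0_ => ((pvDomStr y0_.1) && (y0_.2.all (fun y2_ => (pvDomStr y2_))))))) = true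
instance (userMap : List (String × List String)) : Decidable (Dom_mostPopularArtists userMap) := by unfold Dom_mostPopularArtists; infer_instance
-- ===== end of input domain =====

-- B replaces A's two post-count scans (find max, then collect) by one inverted-index pass
-- (count -> artists bucket, tracking the max) plus a single bucket lookup; same asymptotic cost.

-- ===== PORT A =====
def mostPopularArtists (userMap : List (String × List String)) : List String :=
  let d := PySem.Dict.mk userMap
  let users := d.keys
  let freqs := users.foldl (fun fr user =>
      (d.getD user []).foldl (fun fr artist =>
        if !(fr.contains artist) then fr.insert artist (1 : Int)
        else
          let popularity_count := fr.getD artist 0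
          let popularity_count := popularity_count + 1
          fr.insert artist popularity_count) fr) PySem.Dict.empty
  let maxlikes := freqs.keys.foldl (fun maxlikes artist =>
      if freqs.getD artist 0 > maxlikes then freqs.getD artist 0 else maxlikes) (0 : Int)
  freqs.keys.foldl (fun mostpop artist =>
      if freqs.getD artist 0 == maxlikes then mostpop ++ [artist] else mostpop) []

-- ===== PORT B =====
def mostPopularArtists_alt (userMap : List (String × List String)) : List String :=
  let d := PySem.Dict.mk userMap
  let freqs := d.values.foldl (fun fr artists =>
      artists.foldl (fun fr artist => fr.insert artist (fr.getD artist 0 + 1)) fr)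
      (PySem.Dict.empty : PySem.Dict String Int)
  let st := freqs.items.foldl
      (fun (st : PySem.Dict Int (List String) × Int) p =>
        (st.1.modify p.2 [] (· ++ [p.1]), max st.2 p.2)) (PySem.Dict.empty, 0)
  st.1.getD st.2 []

-- ===== PRECONDITION & SPEC =====
-- Pre_ excludes association lists with duplicate user keys: such a list does not determine
-- the Python dict argument (dict construction keeps only the last binding per key), so the
-- assoc-list ports' first-match convention is arbitrary there.
def Pre_mostPopularArtists (userMap : List (String × List String)) : Prop :=
  (userMap.map Prod.fst).Nodup
instance (userMap : List (String × List String)) : Decidable (Pre_mostPopularArtists userMap) := by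
  unfold Pre_mostPopularArtists; infer_instance
def pvWitness_mostPopularArtists : (List (String × List String)) :=
  [("alice", ["x", "y"]), ("bob", ["y"])]
def Spec_mostPopularArtists (userMap : List (String × List String)) (out : List String) : Prop := out = mostPopularArtists_alt userMap
instance (userMap : List (String × List String)) (out : List String) : Decidable (Spec_mostPopularArtists userMap out) := by unfold Spec_mostPopularArtists; infer_instance

-- ===== CLAIM (what is proved, stated in full; the proofs are below) =====
def Claim_equal_mostPopularArtists : Prop := ∀ (userMap : List (String × List String)), Dom_mostPopularArtists userMap → Pre_mostPopularArtists userMap → Spec_mostPopularArtists userMap (mostPopularArtists userMap)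

-- ===== LEMMAS AND PROOFS =====

-- A's counting step equals B's counting step.
lemma stepAB (fr : PySem.Dict String Int) (a : String) :
    (if !(fr.contains a) then fr.insert a (1 : Int)
     else
       let popularity_count := fr.getD a 0
       let popularity_count := popularity_count + 1
       fr.insert a popularity_count)
    = fr.insert a (fr.getD a 0 + 1) := by
  by_cases h : fr.contains a = true
  · simp [h]
  · simp only [Bool.not_eq_true] at h
    simp [h, PySem.Dict.getD_of_not_contains fr (0 : Int) h]

lemma nodup_keys_count (ls : List (List String)) (d : PySem.Dict String Int)
    (h : d.keys.Nodup) :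
    (ls.foldl (fun fr artists =>
      artists.foldl (fun fr a => fr.insert a (fr.getD a 0 + 1)) fr) d).keys.Nodup := by
  induction ls generalizing d with
  | nil => simpa using h
  | cons l ls ih =>
      simp only [List.foldl_cons]
      exact ih _ (PySem.Dict.nodup_keys_foldl_insert l _ d h)

lemma foldl_pair (l : List (String × Int)) (b : PySem.Dict Int (List String)) (m : Int) :
    l.foldl (fun st p => (st.1.modify p.2 [] (· ++ [p.1]), max st.2 p.2)) (b, m)
    = (l.foldl (fun bu p => bu.modify p.2 [] (· ++ [p.1])) b,
       l.foldl (fun m p => max m p.2) m) := by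
  induction l generalizing b m with
  | nil => rfl
  | cons x xs ih => simp [List.foldl_cons, ih]

-- ===== VERDICT (by name: the statement is the Claim_ definition above) =====
theorem mostPopularArtists_spec : Claim_equal_mostPopularArtists := by
  intro userMap _ hpre
  unfold Spec_mostPopularArtists mostPopularArtists mostPopularArtists_alt
  dsimp only
  set d := PySem.Dict.mk userMap with hd
  have hkeys : d.keys.Nodup := by
    simpa [hd, PySem.Dict.keys, PySem.Dict.mk] using hpre
  -- the two frequency dicts agree
  have hstep : (fun (fr : PySem.Dict String Int) a =>
      if !(fr.contains a) then fr.insert a (1 : Int)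
      else
        let popularity_count := fr.getD a 0
        let popularity_count := popularity_count + 1
        fr.insert a popularity_count)
      = fun fr a => fr.insert a (fr.getD a 0 + 1) := by
    funext fr a; exact stepAB fr a
  have hvals : d.values = d.keys.map (fun k => d.getD k []) :=
    PySem.Dict.values_eq_map_keys d hkeys []
  have hfr :
      d.keys.foldl (fun fr user =>
        (d.getD user []).foldl (fun fr artist =>
          if !(fr.contains artist) then fr.insert artist (1 : Int)
          else
            let popularity_count := fr.getD artist 0
            let popularity_count := popularity_count + 1
            fr.insert artist popularity_count) fr) PySem.Dict.empty
      = d.values.foldl (fun fr artists =>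
          artists.foldl (fun fr a => fr.insert a (fr.getD a 0 + 1)) fr)
          (PySem.Dict.empty : PySem.Dict String Int) := by
    rw [hvals, List.foldl_map, hstep]
  rw [hfr]
  set F := d.values.foldl (fun fr artists =>
      artists.foldl (fun fr a => fr.insert a (fr.getD a 0 + 1)) fr)
      (PySem.Dict.empty : PySem.Dict String Int) with hF
  have hFnd : F.keys.Nodup := by
    rw [hF]
    apply nodup_keys_count
    simp [PySem.Dict.keys, PySem.Dict.empty]
  have hitems : F.items = F.keys.map (fun k => (k, F.getD k 0)) :=
    PySem.Dict.items_eq_map_keys F hFnd 0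
  rw [foldl_pair]
  -- maxlikes agree
  have hmax :
      F.keys.foldl (fun m a => if F.getD a 0 > m then F.getD a 0 else m) (0 : Int)
      = F.items.foldl (fun m p => max m p.2) (0 : Int) := by
    rw [hitems, List.foldl_map]
    apply PySem.List.foldl_congr_mem
    intro m a _
    simp only [max_def]
    split_ifs <;> omega
  rw [← hmax]
  set M := F.keys.foldl (fun m a => if F.getD a 0 > m then F.getD a 0 else m) (0 : Int)
  -- the bucket lookup equals A's collection scan
  have hbucket :
      (F.items.foldl (fun (b : PySem.Dict Int (List String)) p =>
        b.modify p.2 [] (· ++ [p.1])) PySem.Dict.empty).getD M []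
      = (F.items.filter (fun p => p.2 == M)).map (·.1) := by
    have hswap :
        F.items.foldl (fun (b : PySem.Dict Int (List String)) p =>
          b.modify p.2 [] (· ++ [p.1])) PySem.Dict.empty
        = (F.items.map (fun p => (p.2, p.1))).foldl
            (fun (b : PySem.Dict Int (List String)) q =>
              b.modify q.1 [] (· ++ [q.2])) PySem.Dict.empty := by
      rw [List.foldl_map]
    rw [hswap, PySem.Dict.getD_foldl_modify_append, List.filter_map, List.map_map]
    simp [Function.comp_def]
  rw [hbucket, hitems, List.filter_map, List.map_map,
    PySem.List.foldl_append_if_eq_filter]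
  simp [Function.comp_def]
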